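-- pv_equiv track=rewrite | github.com/dipanka-500/medical | documnet ocr/medicscan_ocr/utils/text.py | extract_markdown_tables
-- ===== SOURCE A (Python) =====
-- from typing import Iterable, List
--
-- def extract_markdown_tables(text: str) -> List[dict]:
--     tables = []
--     current = []
--     for line in text.splitlines():
--         if "|" in line:
--             current.append(line)
--         elif current:
--             tables.append({"format": "markdown", "content": "\n".join(current)})
--             current = []
--     if current:
--         tables.append({"format": "markdown", "content": "\n".join(current)})
--     return tables
-- ===== SOURCE B (Python) =====
-- def extract_markdown_tables(text):
--     lines = text.splitlines()
--     n = len(lines)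
--     tables = []
--     i = 0
--     while i < n:
--         if "|" in lines[i]:
--             j = i + 1
--             while j < n and "|" in lines[j]:
--                 j += 1
--             tables.append({"format": "markdown", "content": "\n".join(lines[i:j])})
--             i = j
--         else:
--             i += 1
--     return tables
-- ===== Notes on version B (the rewrite author's own statement) =====
-- stated objective: alternative
-- what changed: Replaces the stateful current-accumulator loop with after-loop flush by a two-pointer run scanner: it finds each maximal run of pipe-containing lines and emits it directly, so no pending buffer or final flush exists.
import Mathlib
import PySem

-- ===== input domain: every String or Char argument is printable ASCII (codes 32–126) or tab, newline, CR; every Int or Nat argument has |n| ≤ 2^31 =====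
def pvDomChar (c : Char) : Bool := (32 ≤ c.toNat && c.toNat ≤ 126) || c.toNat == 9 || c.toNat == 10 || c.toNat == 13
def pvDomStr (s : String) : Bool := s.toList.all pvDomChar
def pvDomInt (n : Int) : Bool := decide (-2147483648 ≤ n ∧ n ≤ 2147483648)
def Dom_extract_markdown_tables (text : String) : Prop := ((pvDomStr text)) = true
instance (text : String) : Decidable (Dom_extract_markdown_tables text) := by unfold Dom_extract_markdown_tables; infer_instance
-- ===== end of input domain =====

-- ===== PORT A =====
-- helper shared by both ports: the Python test '"|" in line'
def pvHasPipe (l : String) : Bool := PySem.Str.isIn "|" l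

-- A: accumulator loop over splitlines with a trailing flush.
def pvMkTable (cur : List String) : List (String × String) :=
  [("format", "markdown"), ("content", PySem.Str.join "\n" cur)]

def pvStepA (st : List (List (String × String)) × List String) (line : String) :
    List (List (String × String)) × List String :=
  if pvHasPipe line then (st.1, st.2 ++ [line])
  else if st.2 ≠ [] then (st.1 ++ [pvMkTable st.2], [])
  else st

def extract_markdown_tables (text : String) : List (List (String × String)) :=
  let st := (PySem.Str.splitlines text).foldl pvStepA ([], [])
  if st.2 ≠ [] then st.1 ++ [pvMkTable st.2] else st.1

-- ===== PORT B =====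
-- B: two-pointer run scanner — emit each maximal run of pipe lines directly (no pending buffer).
def pvRuns (lines : List String) : List (List (String × String)) :=
  match lines with
  | [] => []
  | l :: ls =>
    if pvHasPipe l then
      pvMkTable ((l :: ls).takeWhile pvHasPipe) :: pvRuns ((l :: ls).dropWhile pvHasPipe)
    else pvRuns ls
termination_by lines.length
decreasing_by
  · simp [List.dropWhile_cons, *]
    exact List.length_dropWhile_le pvHasPipe ls
  · simp

def extract_markdown_tables_alt (text : String) : List (List (String × String)) :=
  pvRuns (PySem.Str.splitlines text)

-- ===== PRECONDITION & SPEC =====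
def Spec_extract_markdown_tables (text : String) (out : List (List (String × String))) : Prop := out = extract_markdown_tables_alt text
instance (text : String) (out : List (List (String × String))) : Decidable (Spec_extract_markdown_tables text out) := by unfold Spec_extract_markdown_tables; infer_instance

-- ===== CLAIM (what is proved, stated in full; the proofs are below) =====
def Claim_equal_extract_markdown_tables : Prop := ∀ (text : String), Dom_extract_markdown_tables text → Spec_extract_markdown_tables text (extract_markdown_tables text)

-- ===== LEMMAS AND PROOFS =====

-- A's loop restructured as a recursion (proof-only helper).
def pvEmit (cur : List String) (lines : List String) : List (List (String × String)) :=
  match lines with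
  | [] => if cur ≠ [] then [pvMkTable cur] else []
  | l :: ls =>
    if pvHasPipe l then pvEmit (cur ++ [l]) ls
    else if cur ≠ [] then pvMkTable cur :: pvEmit [] ls
    else pvEmit [] ls

theorem pvFoldA_eq_emit (lines : List String) (tables : List (List (String × String)))
    (cur : List String) :
    (let st := lines.foldl pvStepA (tables, cur)
     if st.2 ≠ [] then st.1 ++ [pvMkTable st.2] else st.1) = tables ++ pvEmit cur lines := by
  induction lines generalizing tables cur with
  | nil =>
    simp only [List.foldl_nil, pvEmit]
    split <;> simp
  | cons l ls ih =>
    simp only [List.foldl_cons, pvEmit, pvStepA]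
    by_cases hp : pvHasPipe l
    · simp [hp, ih]
    · by_cases hc : cur = []
      · simp [hp, hc, ih]
      · simp [hp, hc, ih]

theorem pvEmit_eq_runs (lines : List String) :
    (∀ cur, cur ≠ [] → pvEmit cur lines =
        pvMkTable (cur ++ lines.takeWhile pvHasPipe) :: pvRuns (lines.dropWhile pvHasPipe)) ∧
    pvEmit [] lines = pvRuns lines := by
  induction lines with
  | nil =>
    refine ⟨fun cur hc => ?_, by simp [pvEmit, pvRuns]⟩
    simp [pvEmit, pvRuns, hc]
  | cons l ls ih =>
    constructor
    · intro cur hc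
      by_cases hp : pvHasPipe l
      · simp only [pvEmit, hp, if_pos, List.takeWhile_cons, List.dropWhile_cons]
        rw [ih.1 (cur ++ [l]) (by simp)]
        simp [hp]
      · simp only [pvEmit, hp, Bool.false_eq_true, if_false, hc, ne_eq, not_false_iff, if_pos,
          List.takeWhile_cons, List.dropWhile_cons]
        conv_rhs => rw [pvRuns]
        simp [hp, ih.2]
    · by_cases hp : pvHasPipe l
      · simp only [pvEmit, hp, if_pos]
        have h1 := ih.1 [l] (by simp)
        simp only [List.singleton_append, List.nil_append] at h1 ⊢
        rw [h1]
        conv_rhs => rw [pvRuns]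
        simp [hp]
      · simp only [pvEmit, hp, Bool.false_eq_true, if_false, ne_eq, not_true_eq_false]
        conv_rhs => rw [pvRuns]
        simp [hp, ih.2]

-- ===== VERDICT (by name: the statement is the Claim_ definition above) =====
theorem extract_markdown_tables_spec : Claim_equal_extract_markdown_tables := by
  intro text _
  unfold Spec_extract_markdown_tables extract_markdown_tables extract_markdown_tables_alt
  rw [pvFoldA_eq_emit, (pvEmit_eq_runs _).2]
  simp
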